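-- pv_equiv track=rewrite | github.com/FEHALTENBURG1/extrator_dengue | extrator_dengue_api_streamlit/app_extrator_dengue_api_v2.py | montar_consultas_servidor
-- ===== SOURCE A (Python) =====
-- UF_DF = "53"
--
-- def montar_consultas_servidor(
--     anos: set[str],
--     recorte: str,
--     ufs_notificacao: set[str],
--     municipios_ride: set[str],
-- ) -> list[dict]:
--     """
--     Monta consultas menores tentando empurrar os filtros para a API.
--
--     Como a API pode ignorar parâmetros não documentados, a aplicação ainda
--     mantém filtro local depois de cada resposta.
--     """
--     anos_lista = sorted(anos) if anos else [None]
--     consultas = []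
--
--     def base_por_ano(ano: str | None) -> dict:
--         if ano:
--             return {"nu_ano": ano}
--         return {}
--
--     for ano in anos_lista:
--         base = base_por_ano(ano)
--
--         if recorte == "Brasil inteiro":
--             consultas.append(base)
--
--         elif recorte == "Apenas DF notificador":
--             q = dict(base)
--             q["sg_uf_not"] = UF_DF
--             consultas.append(q)
--
--         elif recorte == "UF(s) específica(s)":
--             for uf in sorted(ufs_notificacao):
--                 q = dict(base)
--                 q["sg_uf_not"] = uf
--                 consultas.append(q)
--
--         elif recorte == "Apenas RIDE residência":
--             for mun in sorted(municipios_ride):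
--                 q = dict(base)
--                 q["id_mn_resi"] = mun
--                 consultas.append(q)
--
--         elif recorte == "DF notificador ou RIDE residência":
--             q = dict(base)
--             q["sg_uf_not"] = UF_DF
--             consultas.append(q)
--
--             for mun in sorted(municipios_ride):
--                 q = dict(base)
--                 q["id_mn_resi"] = mun
--                 consultas.append(q)
--
--     # Remove consultas duplicadas.
--     vistas = set()
--     unicas = []
--     for q in consultas:
--         chave = tuple(sorted(q.items()))
--         if chave not in vistas:
--             vistas.add(chave)
--             unicas.append(q)
--
--     return unicas
-- ===== SOURCE B (Python) =====
-- UF_DF = "53"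
--
--
-- def montar_consultas_servidor(
--     anos: set[str],
--     recorte: str,
--     ufs_notificacao: set[str],
--     municipios_ride: set[str],
-- ) -> list[dict]:
--     """Table-driven rebuild without the duplicate-removal pass.
--
--     Two generated queries can never coincide: within one year every fragment
--     carries a distinct filter (distinct sorted values, or distinct keys), and
--     the 'nu_ano' entry separates different years (at most one falsy year can
--     exist in a set), so the original's seen-set dedup scan is provably a no-op
--     and is dropped.
--     """
--     por_recorte = {
--         "Brasil inteiro": [{}],
--         "Apenas DF notificador": [{"sg_uf_not": UF_DF}],
--         "UF(s) específica(s)": [{"sg_uf_not": u} for u in sorted(ufs_notificacao)],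
--         "Apenas RIDE residência": [{"id_mn_resi": m} for m in sorted(municipios_ride)],
--         "DF notificador ou RIDE residência": [{"sg_uf_not": UF_DF}]
--             + [{"id_mn_resi": m} for m in sorted(municipios_ride)],
--     }
--     fragmentos = por_recorte.get(recorte, [])
--     return [
--         {**({"nu_ano": ano} if ano else {}), **frag}
--         for ano in (sorted(anos) if anos else [None])
--         for frag in fragmentos
--     ]
-- ===== Notes on version B (the rewrite author's own statement) =====
-- stated objective: alternative
-- what changed: B replaces the per-year branch-and-append loops plus seen-set dedup scan with a table of fragment lists keyed by recorte and a flat year-by-fragment product, and drops the dedup pass entirely (the Lean proof shows the generated queries are pairwise distinct, so the pass is a no-op).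
import Mathlib
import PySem

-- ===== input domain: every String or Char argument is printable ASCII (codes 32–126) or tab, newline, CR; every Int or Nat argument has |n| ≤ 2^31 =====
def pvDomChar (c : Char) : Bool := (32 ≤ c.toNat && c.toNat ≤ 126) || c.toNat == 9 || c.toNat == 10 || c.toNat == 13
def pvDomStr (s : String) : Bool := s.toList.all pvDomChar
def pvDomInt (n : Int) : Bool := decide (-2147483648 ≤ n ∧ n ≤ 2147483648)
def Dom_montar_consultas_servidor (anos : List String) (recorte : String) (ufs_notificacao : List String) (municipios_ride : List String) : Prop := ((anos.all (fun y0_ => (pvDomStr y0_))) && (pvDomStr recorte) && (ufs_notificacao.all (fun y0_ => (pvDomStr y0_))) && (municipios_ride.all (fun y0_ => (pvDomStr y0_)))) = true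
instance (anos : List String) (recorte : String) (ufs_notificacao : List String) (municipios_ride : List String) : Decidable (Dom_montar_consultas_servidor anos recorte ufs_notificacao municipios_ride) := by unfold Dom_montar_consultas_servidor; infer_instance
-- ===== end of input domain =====

-- B replaces the per-year branch loops and the seen-set dedup scan by a recorte-keyed table of
-- fragment lists and a flat year×fragment product, dropping the dedup pass, which the proof
-- below shows is a no-op (the generated queries are pairwise distinct); objective: alternative.
-- Dicts are List (String × String): every key written is fresh in its dict (the base holds only
-- "nu_ano" and the merged fragment key differs), so {**q, k: v} is exactly q ++ [(k, v)].

-- ===== PORT A =====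
-- sorted(<set argument>): the Python parameters are sets, so iterate the distinct elements in sorted order
def pvSortedSet (xs : List String) : List String :=
  PySem.List.sorted (PySem.Set.ofList xs) (fun x => x) false

-- base_por_ano: `if ano:` is Python truthiness (None and "" are falsy)
def pvBasePorAno (ano : Option String) : List (String × String) :=
  match ano with
  | none => []
  | some a => if a = "" then [] else [("nu_ano", a)]

-- chave = tuple(sorted(q.items())): pairs compared as Python tuples
def pvChave (q : List (String × String)) : List (String × String) :=
  PySem.List.sorted2 q (fun p => p.1) (fun p => p.2) false

-- A's final duplicate-removal loop
def pvDedup (consultas : List (List (String × String))) : List (List (String × String)) :=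
  (consultas.foldl
    (fun (st : List (List (String × String)) × List (List (String × String))) q =>
      if PySem.Set.contains st.1 (pvChave q) then st
      else (PySem.Set.add st.1 (pvChave q), st.2 ++ [q]))
    ([], [])).2

-- the body of A's `for ano in anos_lista:` loop
def pvStepA (recorte : String) (ufs_notificacao : List String) (municipios_ride : List String)
    (acc : List (List (String × String))) (ano : Option String) : List (List (String × String)) :=
  let base := pvBasePorAno ano
  if recorte = "Brasil inteiro" then acc ++ [base]
  else if recorte = "Apenas DF notificador" then acc ++ [base ++ [("sg_uf_not", "53")]]
  else if recorte = "UF(s) específica(s)" then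
    (pvSortedSet ufs_notificacao).foldl (fun acc uf => acc ++ [base ++ [("sg_uf_not", uf)]]) acc
  else if recorte = "Apenas RIDE residência" then
    (pvSortedSet municipios_ride).foldl (fun acc m => acc ++ [base ++ [("id_mn_resi", m)]]) acc
  else if recorte = "DF notificador ou RIDE residência" then
    (pvSortedSet municipios_ride).foldl (fun acc m => acc ++ [base ++ [("id_mn_resi", m)]])
      (acc ++ [base ++ [("sg_uf_not", "53")]])
  else acc

def montar_consultas_servidor (anos : List String) (recorte : String) (ufs_notificacao : List String) (municipios_ride : List String) : List (List (String × String)) :=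
  let anos_lista : List (Option String) :=
    if anos = [] then [none] else (pvSortedSet anos).map some
  let consultas := anos_lista.foldl (pvStepA recorte ufs_notificacao municipios_ride) []
  pvDedup consultas

-- ===== PORT B =====
-- Source B's `por_recorte` dict literal of fragment lists
def pvPorRecorte (ufs_notificacao : List String) (municipios_ride : List String) :
    PySem.Dict String (List (List (String × String))) :=
  PySem.Dict.ofList
    [("Brasil inteiro", [[]]),
     ("Apenas DF notificador", [[("sg_uf_not", "53")]]),
     ("UF(s) específica(s)", (pvSortedSet ufs_notificacao).map (fun u => [("sg_uf_not", u)])),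
     ("Apenas RIDE residência", (pvSortedSet municipios_ride).map (fun m => [("id_mn_resi", m)])),
     ("DF notificador ou RIDE residência",
        [("sg_uf_not", "53")] :: (pvSortedSet municipios_ride).map (fun m => [("id_mn_resi", m)]))]

def montar_consultas_servidor_alt (anos : List String) (recorte : String) (ufs_notificacao : List String) (municipios_ride : List String) : List (List (String × String)) :=
  let fragmentos := PySem.Dict.getD (pvPorRecorte ufs_notificacao municipios_ride) recorte []
  (if anos = [] then [none] else (pvSortedSet anos).map some).flatMap
    (fun ano => fragmentos.map (fun frag => pvBasePorAno ano ++ frag))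

-- ===== PRECONDITION & SPEC =====
def Spec_montar_consultas_servidor (anos : List String) (recorte : String) (ufs_notificacao : List String) (municipios_ride : List String) (out : List (List (String × String))) : Prop := out = montar_consultas_servidor_alt anos recorte ufs_notificacao municipios_ride
instance (anos : List String) (recorte : String) (ufs_notificacao : List String) (municipios_ride : List String) (out : List (List (String × String))) : Decidable (Spec_montar_consultas_servidor anos recorte ufs_notificacao municipios_ride out) := by unfold Spec_montar_consultas_servidor; infer_instance

-- ===== CLAIM (what is proved, stated in full; the proofs are below) =====
def Claim_equal_montar_consultas_servidor : Prop := ∀ (anos : List String) (recorte : String) (ufs_notificacao : List String) (municipios_ride : List String), Dom_montar_consultas_servidor anos recorte ufs_notificacao municipios_ride → Spec_montar_consultas_servidor anos recorte ufs_notificacao municipios_ride (montar_consultas_servidor anos recorte ufs_notificacao municipios_ride)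

-- ===== LEMMAS AND PROOFS =====

-- the fragment list each recorte selects (proof-side name for B's table lookup / A's branches)
def pvFragmentosDe (recorte : String) (ufs municipios : List String) :
    List (List (String × String)) :=
  if recorte = "Brasil inteiro" then [[]]
  else if recorte = "Apenas DF notificador" then [[("sg_uf_not", "53")]]
  else if recorte = "UF(s) específica(s)" then
    (pvSortedSet ufs).map (fun u => [("sg_uf_not", u)])
  else if recorte = "Apenas RIDE residência" then
    (pvSortedSet municipios).map (fun m => [("id_mn_resi", m)])
  else if recorte = "DF notificador ou RIDE residência" then
    [("sg_uf_not", "53")] :: (pvSortedSet municipios).map (fun m => [("id_mn_resi", m)])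
  else []

-- collapse the per-element append loop A uses into a map
theorem pvFlattenMapSingleton {α β : Type} (l : List α) (f : α → β) :
    (List.map (fun x => [f x]) l).flatten = List.map f l := by
  induction l with
  | nil => simp
  | cons a t ih => simp [ih]

-- one iteration of A's year loop appends exactly the fragments merged with the year base
theorem pvStepA_eq (recorte : String) (ufs municipios : List String)
    (acc : List (List (String × String))) (ano : Option String) :
    pvStepA recorte ufs municipios acc ano =
      acc ++ (pvFragmentosDe recorte ufs municipios).map (fun frag => pvBasePorAno ano ++ frag) := by
  unfold pvStepA pvFragmentosDe
  split_ifs <;> simp [pvFlattenMapSingleton, List.map_map]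

-- folding A's step is a year×fragment flatMap
theorem foldl_pvStepA (recorte : String) (ufs municipios : List String) :
    ∀ (l : List (Option String)) (acc : List (List (String × String))),
      l.foldl (pvStepA recorte ufs municipios) acc =
        acc ++ l.flatMap (fun ano =>
          (pvFragmentosDe recorte ufs municipios).map (fun frag => pvBasePorAno ano ++ frag)) := by
  intro l
  induction l with
  | nil => intro acc; simp
  | cons a t ih => intro acc; simp [List.foldl_cons, pvStepA_eq, ih]

-- B's table lookup selects exactly pvFragmentosDe
theorem pvPorRecorte_getD (recorte : String) (ufs municipios : List String) :
    PySem.Dict.getD (pvPorRecorte ufs municipios) recorte [] =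
      pvFragmentosDe recorte ufs municipios := by
  unfold pvFragmentosDe
  split_ifs with h1 h2 h3 h4 h5
  · subst h1; rfl
  · subst h2; rfl
  · subst h3; rfl
  · subst h4; rfl
  · subst h5; rfl
  · rw [PySem.Dict.getD_eq_get?_getD]
    have : PySem.Dict.get? (pvPorRecorte ufs municipios) recorte = none := by
      simp [pvPorRecorte, PySem.Dict.get?, PySem.Dict.ofList, PySem.Dict.update,
        PySem.Dict.insert, PySem.Dict.empty, PySem.Dict.contains]
      exact ⟨fun h => h1 h.symm, fun h => h2 h.symm, fun h => h3 h.symm,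
        fun h => h4 h.symm, fun h => h5 h.symm⟩
    simp [this]

-- shapes of the year bases and of the fragments
def pvIsBase (b : List (String × String)) : Prop := b = [] ∨ ∃ a, b = [("nu_ano", a)]
def pvIsFrag (f : List (String × String)) : Prop :=
  f = [] ∨ (∃ x, f = [("sg_uf_not", x)]) ∨ (∃ m, f = [("id_mn_resi", m)])

theorem pvIsBase_basePorAno (ano : Option String) : pvIsBase (pvBasePorAno ano) := by
  unfold pvIsBase
  cases ano with
  | none => exact Or.inl rfl
  | some a => by_cases h : a = "" <;> simp [pvBasePorAno, h]

theorem pvIsFrag_mem (recorte : String) (ufs municipios : List String) (f : List (String × String))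
    (hf : f ∈ pvFragmentosDe recorte ufs municipios) : pvIsFrag f := by
  unfold pvFragmentosDe at hf
  unfold pvIsFrag
  split_ifs at hf <;>
    simp only [List.mem_cons, List.mem_map, List.not_mem_nil, or_false] at hf
  · exact Or.inl hf
  · exact Or.inr (Or.inl ⟨"53", hf⟩)
  · rcases hf with ⟨u, _, rfl⟩
    exact Or.inr (Or.inl ⟨u, rfl⟩)
  · rcases hf with ⟨m, _, rfl⟩
    exact Or.inr (Or.inr ⟨m, rfl⟩)
  · rcases hf with rfl | ⟨m, _, rfl⟩
    · exact Or.inr (Or.inl ⟨"53", rfl⟩)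
    · exact Or.inr (Or.inr ⟨m, rfl⟩)

-- a two-element permutation with matching distinct keys forces equal values
theorem pvPair2 (k1 k2 : String) (hk : k1 ≠ k2) (v1 v2 w1 w2 : String)
    (hp : [(k1, v1), (k2, w1)].Perm [(k1, v2), (k2, w2)]) : v1 = v2 ∧ w1 = w2 := by
  have h1 : (k1, v1) ∈ [(k1, v2), (k2, w2)] := hp.mem_iff.mp (by simp)
  have h2 : (k2, w1) ∈ [(k1, v2), (k2, w2)] := hp.mem_iff.mp (by simp)
  simp [Prod.ext_iff, hk, hk.symm] at h1 h2
  exact ⟨h1, h2⟩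

-- no permutation between two-element lists whose second keys differ
theorem pvPair2' (k1 k2 k3 : String) (hk : k2 ≠ k3) (hk2 : k2 ≠ k1) (v1 v2 w1 w2 : String)
    (hp : [(k1, v1), (k2, w1)].Perm [(k1, v2), (k3, w2)]) : False := by
  have h2 : (k2, w1) ∈ [(k1, v2), (k3, w2)] := hp.mem_iff.mp (by simp)
  simp [Prod.ext_iff, hk, hk2] at h2

-- a permutation between base++fragment queries forces both components equal
theorem pvQInj (b1 b2 f1 f2 : List (String × String))
    (hb1 : pvIsBase b1) (hb2 : pvIsBase b2) (hf1 : pvIsFrag f1) (hf2 : pvIsFrag f2)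
    (hp : (b1 ++ f1).Perm (b2 ++ f2)) : b1 = b2 ∧ f1 = f2 := by
  rcases hb1 with rfl | ⟨a1, rfl⟩ <;> rcases hb2 with rfl | ⟨a2, rfl⟩ <;>
    rcases hf1 with rfl | ⟨x1, rfl⟩ | ⟨m1, rfl⟩ <;> rcases hf2 with rfl | ⟨x2, rfl⟩ | ⟨m2, rfl⟩
  all_goals (try simp only [List.nil_append, List.append_nil] at hp ⊢)
  all_goals
    first
    | (have hl := hp.length_eq; simp only [List.length_append, List.length_cons, List.length_nil] at hl; omega)
    | (rcases pvPair2 _ _ (by decide) _ _ _ _ hp with ⟨rfl, rfl⟩; exact ⟨rfl, rfl⟩)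
    | exact absurd hp (fun h => pvPair2' _ _ _ (by decide) (by decide) _ _ _ _ h)
    | (constructor <;> simp_all [List.perm_singleton, Prod.ext_iff])

-- equal dedup keys mean the two dicts are permutations of each other
theorem pvChave_eq_perm (q1 q2 : List (String × String)) (h : pvChave q1 = pvChave q2) :
    q1.Perm q2 := by
  have h1 := PySem.List.sorted2_perm q1 (fun p : String × String => p.1)
    (fun p : String × String => p.2) false
  have h2 := PySem.List.sorted2_perm q2 (fun p : String × String => p.1)
    (fun p : String × String => p.2) false
  exact (h1.symm.trans (h ▸ h2 : (pvChave q1).Perm q2))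

-- distinct year strings give distinct bases
theorem pvBase_inj (a b : String) (hab : a ≠ b) :
    pvBasePorAno (some a) ≠ pvBasePorAno (some b) := by
  by_cases h1 : a = "" <;> by_cases h2 : b = ""
  · exact absurd (h1.trans h2.symm) hab
  · simp [pvBasePorAno, h1, h2]
  · simp [pvBasePorAno, h1, h2]
  · simp [pvBasePorAno, h1, h2, hab]

-- the fragment list of every recorte is pairwise distinct
theorem pvFrag_pairwise (recorte : String) (ufs municipios : List String) :
    (pvFragmentosDe recorte ufs municipios).Pairwise (· ≠ ·) := by
  unfold pvFragmentosDe
  have hufs := PySem.List.sorted_ofList_pairwise_lt (xs := ufs)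
  have hmun := PySem.List.sorted_ofList_pairwise_lt (xs := municipios)
  split_ifs
  · simp
  · simp
  · exact (List.pairwise_map.mpr (hufs.imp (by intro a b h; simp [ne_of_lt h])))
  · exact (List.pairwise_map.mpr (hmun.imp (by intro a b h; simp [ne_of_lt h])))
  · refine List.Pairwise.cons ?_ (List.pairwise_map.mpr (hmun.imp (by intro a b h; simp [ne_of_lt h])))
    intro f hf
    rcases List.mem_map.mp hf with ⟨m, _, rfl⟩
    simp
  · simp

-- the year list holds pairwise distinct bases
theorem pvAnos_pairwise (anos : List String) :
    (if anos = [] then [none] else (pvSortedSet anos).map some).Pairwise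
      (fun o1 o2 => pvBasePorAno o1 ≠ pvBasePorAno o2) := by
  split_ifs
  · simp
  · refine List.pairwise_map.mpr ?_
    exact (PySem.List.sorted_ofList_pairwise_lt (xs := anos)).imp
      (fun h => pvBase_inj _ _ (ne_of_lt h))

-- the generated queries have pairwise distinct dedup keys
theorem pvChaves_nodup (anos : List String) (recorte : String) (ufs municipios : List String) :
    (((if anos = [] then [none] else (pvSortedSet anos).map some).flatMap
      (fun ano => (pvFragmentosDe recorte ufs municipios).map
        (fun frag => pvBasePorAno ano ++ frag))).map pvChave).Nodup := by
  rw [List.map_flatMap]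
  unfold List.Nodup
  rw [List.pairwise_flatMap]
  constructor
  · intro ano _
    rw [List.map_map, List.pairwise_map]
    refine List.Pairwise.imp_of_mem ?_ (pvFrag_pairwise recorte ufs municipios)
    intro f1 f2 hm1 hm2 hne heq
    exact hne (pvQInj _ _ _ _ (pvIsBase_basePorAno ano) (pvIsBase_basePorAno ano)
      (pvIsFrag_mem _ _ _ _ hm1) (pvIsFrag_mem _ _ _ _ hm2)
      (pvChave_eq_perm _ _ heq)).2
  · refine (pvAnos_pairwise anos).imp ?_
    intro o1 o2 hne c1 hc1 c2 hc2 heq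
    simp only [List.map_map, List.mem_map, Function.comp] at hc1 hc2
    rcases hc1 with ⟨f1, hf1, rfl⟩
    rcases hc2 with ⟨f2, hf2, rfl⟩
    exact hne (pvQInj _ _ _ _ (pvIsBase_basePorAno o1) (pvIsBase_basePorAno o2)
      (pvIsFrag_mem _ _ _ _ hf1) (pvIsFrag_mem _ _ _ _ hf2)
      (pvChave_eq_perm _ _ heq)).1

-- the dedup fold passes every query through when all dedup keys are new and pairwise distinct
theorem pvDedup_fold_id (l : List (List (String × String))) :
    ∀ (seen : List (List (String × String))) (out : List (List (String × String))),
      (∀ q ∈ l, pvChave q ∉ seen) → (l.map pvChave).Nodup →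
      (l.foldl
        (fun (st : List (List (String × String)) × List (List (String × String))) q =>
          if PySem.Set.contains st.1 (pvChave q) then st
          else (PySem.Set.add st.1 (pvChave q), st.2 ++ [q]))
        (seen, out)).2 = out ++ l := by
  induction l with
  | nil => intro seen out _ _; simp
  | cons q t ih =>
    intro seen out hnew hnd
    have hq : pvChave q ∉ seen := hnew q (by simp)
    have hcont : PySem.Set.contains seen (pvChave q) = false := by
      by_contra h
      exact hq ((PySem.Set.contains_iff seen (pvChave q)).mp (by simpa using h))
    simp only [List.foldl_cons, hcont, Bool.false_eq_true, if_false]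
    rw [ih (PySem.Set.add seen (pvChave q)) (out ++ [q]) ?_ (by simp at hnd; exact hnd.2)]
    · simp
    · intro q' hq' hmem
      rcases (PySem.Set.mem_add seen (pvChave q) (pvChave q')).mp hmem with h | h
      · exact hnew q' (by simp [hq']) h
      · simp only [List.map_cons, List.nodup_cons] at hnd
        exact hnd.1 (h ▸ List.mem_map_of_mem hq')

theorem pvDedup_id (l : List (List (String × String))) (h : (l.map pvChave).Nodup) :
    pvDedup l = l := by
  unfold pvDedup
  rw [pvDedup_fold_id l [] [] (by simp) h]
  simp

-- ===== VERDICT (by name: the statement is the Claim_ definition above) =====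
theorem montar_consultas_servidor_spec : Claim_equal_montar_consultas_servidor := by
  intro anos recorte ufs municipios _
  unfold Spec_montar_consultas_servidor montar_consultas_servidor montar_consultas_servidor_alt
  rw [pvPorRecorte_getD]
  simp only [foldl_pvStepA, List.nil_append]
  exact pvDedup_id _ (pvChaves_nodup anos recorte ufs municipios)
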